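-- pv_equiv track=rewrite | github.com/MasterUgwae/project-euler | 054.py | find_four_of
-- ===== SOURCE A (Python) =====
-- from types import NoneType
--
-- def find_four_of(lst)->str|NoneType:
--     seen = []
--     for item in lst:
--         if item in seen:
--             if seen.count(item)==3:
--                 return item
--         seen.append(item)
--     return None
-- ===== SOURCE B (Python) =====
-- def find_four_of(lst):
--     positions = {}
--     for i, item in enumerate(lst):
--         positions.setdefault(item, []).append(i)
--     best = None  # (item, index of its 4th occurrence)
--     for item, pos in positions.items():
--         if len(pos) >= 4 and (best is None or pos[3] < best[1]):
--             best = (item, pos[3])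
--     return best[0] if best is not None else None
-- ===== Notes on version B (the rewrite author's own statement) =====
-- stated objective: alternative
-- what changed: Replaces A's early-returning streaming scan over a growing seen-list with a staged algorithm: one pass builds a dict mapping each element to the list of its positions, then a reduce over the dict's items returns the element whose 4th-occurrence position is smallest (none if no element occurs four times).
import Mathlib
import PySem

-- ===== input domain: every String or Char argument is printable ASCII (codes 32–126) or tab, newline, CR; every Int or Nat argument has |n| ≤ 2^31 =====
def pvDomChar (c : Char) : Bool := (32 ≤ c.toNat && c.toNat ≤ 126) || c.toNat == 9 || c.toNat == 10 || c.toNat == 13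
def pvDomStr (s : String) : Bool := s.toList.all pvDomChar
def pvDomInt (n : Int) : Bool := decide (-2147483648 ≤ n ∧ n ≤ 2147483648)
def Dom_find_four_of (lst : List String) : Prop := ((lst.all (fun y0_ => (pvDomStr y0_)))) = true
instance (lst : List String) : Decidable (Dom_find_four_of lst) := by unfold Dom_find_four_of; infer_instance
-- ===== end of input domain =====

-- B replaces A's streaming seen-list scan by a staged algorithm: one pass groups the
-- positions of each element in a dict, then a reduce over the dict's items returns the
-- element whose 4th-occurrence position is smallest (objective: alternative).

-- ===== PORT A =====
def findFourGoA (seen : List String) : List String → Option String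
  | [] => none
  | x :: xs =>
      if seen.contains x then
        if PySem.List.count seen x == 3 then some x
        else findFourGoA (seen ++ [x]) xs
      else findFourGoA (seen ++ [x]) xs

def find_four_of (lst : List String) : Option String := findFourGoA [] lst

-- ===== PORT B =====
-- positions.setdefault(item, []).append(i)  -- i.e. d[item] = d.get(item, []) ++ [i], exactly Dict.modify
def buildPos (lst : List String) : PySem.Dict String (List Int) :=
  (PySem.List.enumerate lst).foldl (fun d p => d.modify p.2 [] (fun v => v ++ [p.1])) PySem.Dict.empty

-- for item, pos in positions.items(): if len(pos) >= 4 and (best is None or pos[3] < best[1]): best = (item, pos[3])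
def pickBest (best : Option (String × Int)) : List (String × List Int) → Option (String × Int)
  | [] => best
  | (item, pos) :: rest =>
      if 4 ≤ pos.length then
        match PySem.List.pyGet? pos 3 with
        | some p =>
            match best with
            | none => pickBest (some (item, p)) rest
            | some b => if p < b.2 then pickBest (some (item, p)) rest else pickBest best rest
        | none => pickBest best rest   -- unreachable: 4 ≤ pos.length makes pos[3] defined
      else pickBest best rest

def find_four_of_alt (lst : List String) : Option String :=
  (pickBest none (buildPos lst).items).map (fun b => b.1)

-- ===== PRECONDITION & SPEC =====
def Spec_find_four_of (lst : List String) (out : Option String) : Prop := out = find_four_of_alt lst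
instance (lst : List String) (out : Option String) : Decidable (Spec_find_four_of lst out) := by unfold Spec_find_four_of; infer_instance

-- ===== CLAIM (what is proved, stated in full; the proofs are below) =====
def Claim_equal_find_four_of : Prop := ∀ (lst : List String), Dom_find_four_of lst → Spec_find_four_of lst (find_four_of lst)

-- ===== LEMMAS AND PROOFS =====

-- j is a "4th-occurrence position" of its element: the prefix before j already holds it 3 times.
def hitB (lst : List String) (j : Nat) : Bool := (lst.take j).count (lst.getD j "") == 3

-- positions (as Python indices, starting at s) of x in a list
def posC (x : String) : Int → List String → List Int
  | _, [] => []
  | s, c :: cs => (if c == x then [s] else []) ++ posC x (s + 1) cs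

-- ---- A-side characterization: A returns the element at the first 4th-occurrence position ----
theorem goA_char (lst : List String) : ∀ (k n : Nat), n + k = lst.length →
    findFourGoA (lst.take n) (lst.drop n)
      = (List.find? (fun j => hitB lst j) (List.range' n k)).map (fun j => lst.getD j "") := by
  intro k
  induction k with
  | zero =>
      intro n hn
      rw [List.drop_of_length_le (by omega)]
      rfl
  | succ k ih =>
      intro n hn
      have hlt : n < lst.length := by omega
      rw [List.drop_eq_getElem_cons hlt, List.range'_succ]
      have hget? : lst[n]? = some lst[n] := List.getElem?_eq_getElem hlt
      have hrec : lst.take n ++ [lst[n]] = lst.take (n + 1) := by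
        rw [List.take_succ, List.getElem?_eq_getElem hlt]; rfl
      by_cases h3 : (lst.take n).count lst[n] = 3
      · have hmem : lst[n] ∈ lst.take n := List.count_pos_iff.mp (by omega)
        have hhit : hitB lst n = true := by simp [hitB, List.getD, hget?, h3]
        rw [List.find?_cons_of_pos hhit]
        simp [findFourGoA, hmem, PySem.List.count, h3, List.getD, hget?]
      · have hhit : ¬ hitB lst n = true := by simp [hitB, List.getD, hget?, h3]
        rw [List.find?_cons_of_neg hhit]
        have htail := ih (n + 1) (by omega)
        rw [hrec] at *
        by_cases hmem : (lst.take n).contains lst[n] <;>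
          simp [findFourGoA, hmem, PySem.List.count, h3, hrec, htail]

theorem A_char (lst : List String) :
    find_four_of lst
      = (List.find? (fun j => hitB lst j) (List.range' 0 lst.length)).map (fun j => lst.getD j "") := by
  have := goA_char lst lst.length 0 (by omega)
  simpa [find_four_of] using this

-- ---- posC: length and element characterization ----
theorem posC_length (x : String) : ∀ (cs : List String) (s : Int),
    (posC x s cs).length = cs.count x := by
  intro cs
  induction cs with
  | nil => intro s; rfl
  | cons c cs ih =>
      intro s
      have hposC : posC x s (c :: cs) = (if c == x then [s] else []) ++ posC x (s + 1) cs := rfl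
      rw [hposC, List.length_append, ih, List.count_cons]
      by_cases hc : c = x
      · subst hc; simp [Nat.add_comm]
      · simp [hc, Ne.symm hc]

theorem posC_get (x : String) : ∀ (cs : List String) (k : Nat) (s j : Int),
    ((posC x s cs)[k]? = some j)
      ↔ (∃ jn : Nat, j = s + jn ∧ ∃ h : jn < cs.length, cs[jn] = x ∧ (cs.take jn).count x = k) := by
  intro cs
  induction cs with
  | nil => intro k s j; simp [posC]
  | cons c cs ih =>
      intro k s j
      have hposC : posC x s (c :: cs) = (if c == x then [s] else []) ++ posC x (s + 1) cs := rfl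
      by_cases hc : c = x
      · subst hc
        rw [hposC, if_pos (beq_self_eq_true c), List.singleton_append]
        cases k with
        | zero =>
            rw [List.getElem?_cons_zero]
            constructor
            · rintro h
              obtain rfl : s = j := Option.some_inj.mp h
              exact ⟨0, by simp, by simp, by simp, by simp⟩
            · rintro ⟨jn, rfl, hlt, hx, hcnt⟩
              cases jn with
              | zero => simp
              | succ m =>
                  exfalso
                  rw [List.take_succ_cons, List.count_cons] at hcnt
                  simp at hcnt
        | succ k =>
            rw [List.getElem?_cons_succ, ih k (s + 1) j]
            constructor
            · rintro ⟨m, rfl, hlt, hx, hcnt⟩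
              refine ⟨m + 1, by push_cast; ring, by simpa using Nat.succ_lt_succ hlt,
                by simpa using hx, ?_⟩
              rw [List.take_succ_cons, List.count_cons]
              simp [hcnt]
            · rintro ⟨jn, rfl, hlt, hx, hcnt⟩
              cases jn with
              | zero => simp at hcnt
              | succ m =>
                  rw [List.take_succ_cons, List.count_cons] at hcnt
                  simp only [List.length_cons, Nat.succ_lt_succ_iff] at hlt
                  simp only [List.getElem_cons_succ] at hx
                  refine ⟨m, by push_cast; ring, hlt, hx, ?_⟩
                  simp at hcnt
                  omega
      · rw [hposC, if_neg (by simp [hc]), List.nil_append, ih k (s + 1) j]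
        constructor
        · rintro ⟨m, rfl, hlt, hx, hcnt⟩
          refine ⟨m + 1, by push_cast; ring, by simpa using Nat.succ_lt_succ hlt,
            by simpa using hx, ?_⟩
          rw [List.take_succ_cons, List.count_cons]
          simp [hcnt, hc, Ne.symm hc]
        · rintro ⟨jn, rfl, hlt, hx, hcnt⟩
          cases jn with
          | zero =>
              exfalso
              simp only [List.getElem_cons_zero] at hx
              exact hc hx
          | succ m =>
              rw [List.take_succ_cons, List.count_cons] at hcnt
              simp only [List.length_cons, Nat.succ_lt_succ_iff] at hlt
              simp only [List.getElem_cons_succ] at hx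
              refine ⟨m, by push_cast; ring, hlt, hx, ?_⟩
              simp [hc, Ne.symm hc] at hcnt
              exact hcnt

-- ---- the dict built by B ----
theorem enum_swap_posC (x : String) : ∀ (cs : List String) (s : Int),
    (((PySem.List.enumerate cs s).map Prod.swap).filter (fun p => p.1 == x)).map (fun p => p.2)
      = posC x s cs := by
  intro cs
  induction cs with
  | nil => intro s; simp [PySem.List.enumerate, posC]
  | cons c cs ih =>
      intro s
      rw [PySem.List.enumerate_cons]
      by_cases hc : c = x <;> simp [posC, hc, ih, Prod.swap]

theorem buildPos_getD (lst : List String) (x : String) :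
    (buildPos lst).getD x [] = posC x 0 lst := by
  have hfold : buildPos lst
      = ((PySem.List.enumerate lst).map Prod.swap).foldl
          (fun d p => d.modify p.1 [] (fun v => v ++ [p.2])) PySem.Dict.empty := by
    rw [List.foldl_map]; rfl
  rw [hfold, PySem.Dict.getD_foldl_modify_append, PySem.Dict.getD_empty, List.nil_append]
  exact enum_swap_posC x lst 0

theorem buildPos_keys (lst : List String) : (buildPos lst).keys = PySem.Set.ofList lst := by
  have := PySem.Dict.keys_foldl_modify_key (PySem.List.enumerate lst) (fun p => p.2) []
    (fun (d : PySem.Dict String (List Int)) (p : Int × String) (v : List Int) => v ++ [p.1]) PySem.Dict.empty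
  rw [buildPos, this, PySem.Dict.keys_empty, PySem.List.map_snd_enumerate,
      PySem.Set.ofList_eq_foldl]
  rfl

theorem buildPos_items (lst : List String) :
    (buildPos lst).items = (PySem.Set.ofList lst).map (fun x => (x, posC x 0 lst)) := by
  have hnd : (buildPos lst).keys.Nodup := by
    rw [buildPos]
    exact PySem.Dict.nodup_keys_foldl_modify_key _ (fun p => p.2) []
      (fun (d : PySem.Dict String (List Int)) (p : Int × String) (v : List Int) => v ++ [p.1]) _
      (by rw [PySem.Dict.keys_empty]; exact List.nodup_nil)
  rw [PySem.Dict.items_eq_map_keys _ hnd [], buildPos_keys]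
  exact List.map_congr_left (fun k _ => by rw [buildPos_getD])

-- ---- the reduce over items as a min-fold over the candidate list ----
def cnd (p : String × List Int) : Option (String × Int) :=
  if 4 ≤ p.2.length then some (p.1, p.2.getD 3 0) else none

def minFold (best : Option (String × Int)) (l : List (String × Int)) : Option (String × Int) :=
  l.foldl (fun b e => match b with
    | none => some e
    | some b' => if e.2 < b'.2 then some e else b') best

theorem pickBest_eq : ∀ (l : List (String × List Int)) (best : Option (String × Int)),
    pickBest best l = minFold best (l.filterMap cnd) := by
  intro l
  induction l with
  | nil => intro best; rfl
  | cons p l ih =>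
      intro best
      obtain ⟨item, pos⟩ := p
      by_cases h4 : 4 ≤ pos.length
      · have hget : PySem.List.pyGet? pos 3 = some (pos.getD 3 0) := by
          have h3 : (3 : Nat) < pos.length := by omega
          have : PySem.List.pyGet? pos ((3 : Nat) : Int) = pos[(3 : Nat)]? :=
            PySem.List.pyGet?_natCast pos 3
          simpa [List.getElem?_eq_getElem h3, List.getD_eq_getElem pos 0 h3] using this
        cases best with
        | none => simp [pickBest, h4, hget, cnd, minFold, ih]
        | some b =>
            have hcnd : cnd (item, pos) = some (item, pos.getD 3 0) := by simp [cnd, h4]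
            rw [List.filterMap_cons, hcnd]
            have hstep : minFold (some b) ((item, pos.getD 3 0) :: List.filterMap cnd l)
                = if pos.getD 3 0 < b.2 then minFold (some (item, pos.getD 3 0)) (List.filterMap cnd l)
                  else minFold (some b) (List.filterMap cnd l) := by
              show minFold (if pos.getD 3 0 < b.2 then some (item, pos.getD 3 0) else some b)
                  (List.filterMap cnd l) = _
              split <;> rfl
            rw [hstep]
            simp only [pickBest, if_pos h4, hget]
            split <;> exact ih _
      · simp [pickBest, h4, cnd, minFold, ih]

theorem minFold_eq_none_iff : ∀ (l : List (String × Int)) (best : Option (String × Int)),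
    minFold best l = none ↔ best = none ∧ l = [] := by
  intro l
  induction l with
  | nil => intro best; simp [minFold]
  | cons e l ih =>
      intro best
      have step : minFold best (e :: l)
          = minFold ((fun (b : Option (String × Int)) (e : String × Int) => match b with
              | none => some e
              | some b' => if e.2 < b'.2 then some e else b') best e) l := rfl
      rw [step, ih]
      cases best with
      | none => simp
      | some b => by_cases h : e.2 < b.2 <;> simp [h]

theorem minFold_spec : ∀ (l : List (String × Int)) (best : Option (String × Int))
    (e : String × Int), minFold best l = some e →
    (e ∈ best.toList ++ l) ∧ ∀ f ∈ best.toList ++ l, e.2 ≤ f.2 := by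
  intro l
  induction l with
  | nil =>
      intro best e h
      simp [minFold] at h
      subst h
      simp
  | cons g l ih =>
      intro best e h
      have step : minFold best (g :: l)
          = minFold ((fun (b : Option (String × Int)) (e : String × Int) => match b with
              | none => some e
              | some b' => if e.2 < b'.2 then some e else b') best g) l := rfl
      rw [step] at h
      cases best with
      | none =>
          obtain ⟨hm, hmin⟩ := ih (some g) e h
          simp at hm hmin ⊢
          constructor
          · tauto
          · exact ⟨hmin.1, hmin.2⟩
      | some b =>
          rw [show ((fun (b : Option (String × Int)) (e : String × Int) => match b with
              | none => some e
              | some b' => if e.2 < b'.2 then some e else b') (some b) g)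
            = if g.2 < b.2 then some g else some b from rfl] at h
          by_cases hlt : g.2 < b.2
          · rw [if_pos hlt] at h
            obtain ⟨hm, hmin⟩ := ih (some g) e h
            simp at hm hmin ⊢
            refine ⟨by tauto, by omega, hmin.1, hmin.2⟩
          · rw [if_neg hlt] at h
            obtain ⟨hm, hmin⟩ := ih (some b) e h
            simp at hm hmin ⊢
            refine ⟨by tauto, hmin.1, by omega, hmin.2⟩

theorem mem_range0 {n j : Nat} (h : j < n) : j ∈ List.range' 0 n := by
  rw [List.mem_range']
  exact ⟨j, h, by omega⟩

-- find? over an increasing range returns the least satisfying index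
theorem find?_range'_min {p : Nat → Bool} {s k j : Nat}
    (h : List.find? p (List.range' s k) = some j) :
    ∀ i ∈ List.range' s k, p i = true → j ≤ i := by
  intro i hi hp
  obtain ⟨hpj, as, bs, heq, hnot⟩ := List.find?_eq_some_iff_append.mp h
  have hpw : (List.range' s k).Pairwise (· < ·) := List.pairwise_lt_range' (s := s) (n := k) 1
  rw [heq] at hpw hi
  rcases List.mem_append.mp hi with hin | hin
  · exact absurd hp (by simpa using hnot i hin)
  · rcases List.mem_cons.mp hin with rfl | hin
    · exact Nat.le_refl _
    · have := (List.pairwise_append.mp hpw).2.1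
      exact Nat.le_of_lt ((List.pairwise_cons.mp this).1 i hin)

-- a hit position means its element occurs at least 4 times
theorem count_ge_four_of_hit (lst : List String) (j : Nat) (hj : j < lst.length)
    (hh : hitB lst j = true) : 4 ≤ lst.count lst[j] := by
  have hget? : lst[j]? = some lst[j] := List.getElem?_eq_getElem hj
  have h3 : (lst.take j).count lst[j] = 3 := by
    simpa [hitB, List.getD, hget?] using hh
  have h2 : lst.take j ++ [lst[j]] = lst.take (j + 1) := by
    rw [List.take_succ, hget?]; rfl
  have h1 : (lst.take (j + 1)).count lst[j] = 4 := by
    rw [← h2, List.count_append, h3, List.count_singleton_self]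
  have hsub : (lst.take (j + 1)).count lst[j] ≤ lst.count lst[j] :=
    (List.take_sublist _ _).count_le _
  omega

-- the candidate list B reduces over
theorem cand_char (lst : List String) (e : String × Int)
    (he : e ∈ ((PySem.Set.ofList lst).map (fun x => (x, posC x 0 lst))).filterMap cnd) :
    ∃ jn : Nat, e.2 = (jn : Int) ∧ ∃ h : jn < lst.length, lst[jn] = e.1 ∧ hitB lst jn = true := by
  rw [List.filterMap_map, List.mem_filterMap] at he
  obtain ⟨x, hx, hcnd⟩ := he
  have hcnd' : (if 4 ≤ (posC x 0 lst).length then some (x, (posC x 0 lst).getD 3 0) else none)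
      = some e := hcnd
  by_cases h4 : 4 ≤ (posC x 0 lst).length
  · rw [if_pos h4] at hcnd'
    obtain rfl := Option.some_inj.mp hcnd'
    have h3 : (3 : Nat) < (posC x 0 lst).length := by omega
    have hget : (posC x 0 lst)[(3 : Nat)]? = some ((posC x 0 lst).getD 3 0) := by
      rw [List.getElem?_eq_getElem h3, List.getD_eq_getElem _ _ h3]
    obtain ⟨jn, hjv, hlt, hxe, hcnt⟩ := (posC_get x lst 3 0 _).mp hget
    have hget? : lst[jn]? = some lst[jn] := List.getElem?_eq_getElem hlt
    have hhit2 : hitB lst jn = true := by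
      simp [hitB, List.getD, hget?, hxe, hcnt]
    exact ⟨jn, by simpa using hjv, hlt, by simpa using hxe, hhit2⟩
  · rw [if_neg h4] at hcnd'
    exact absurd hcnd' (by simp)

theorem hit_cand (lst : List String) (j : Nat) (hj : j < lst.length)
    (hh : hitB lst j = true) :
    (lst[j], (j : Int)) ∈ ((PySem.Set.ofList lst).map (fun x => (x, posC x 0 lst))).filterMap cnd := by
  have hget? : lst[j]? = some lst[j] := List.getElem?_eq_getElem hj
  have h3 : (lst.take j).count lst[j] = 3 := by
    simpa [hitB, List.getD, hget?] using hh
  have hc4 : 4 ≤ lst.count lst[j] := count_ge_four_of_hit lst j hj hh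
  have hlen : 4 ≤ (posC lst[j] 0 lst).length := by rw [posC_length]; exact hc4
  have hget : (posC lst[j] 0 lst)[(3 : Nat)]? = some ((j : Int)) :=
    (posC_get lst[j] lst 3 0 (j : Int)).mpr ⟨j, by simp, hj, rfl, h3⟩
  have h3' : (3 : Nat) < (posC lst[j] 0 lst).length := by omega
  have hgd : (posC lst[j] 0 lst).getD 3 0 = (j : Int) := by
    rw [List.getD_eq_getElem _ _ h3']
    have := hget
    rw [List.getElem?_eq_getElem h3'] at this
    exact Option.some_inj.mp this
  rw [List.filterMap_map, List.mem_filterMap]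
  refine ⟨lst[j], (PySem.Set.mem_ofList lst _).mpr (List.getElem_mem hj), ?_⟩
  show cnd (lst[j], posC lst[j] 0 lst) = some (lst[j], (j : Int))
  have hcv : cnd (lst[j], posC lst[j] 0 lst)
      = some (lst[j], (posC lst[j] 0 lst).getD 3 0) := by
    simp [cnd, hlen]
  rw [hcv, hgd]

-- ===== VERDICT (by name: the statement is the Claim_ definition above) =====
theorem find_four_of_spec : Claim_equal_find_four_of := by
  intro lst _
  unfold Spec_find_four_of
  rw [A_char]
  rw [show find_four_of_alt lst
      = (minFold none (((PySem.Set.ofList lst).map (fun x => (x, posC x 0 lst))).filterMap cnd)).map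
          (fun b => b.1) by
    rw [find_four_of_alt, pickBest_eq, buildPos_items]]
  set cl := ((PySem.Set.ofList lst).map (fun x => (x, posC x 0 lst))).filterMap cnd with hcl
  cases hF : List.find? (fun j => hitB lst j) (List.range' 0 lst.length) with
  | none =>
      have hnone := List.find?_eq_none.mp hF
      have hclnil : cl = [] := by
        rw [List.eq_nil_iff_forall_not_mem]
        intro e he
        obtain ⟨jn, _, hlt, _, hh⟩ := cand_char lst e he
        exact hnone jn (mem_range0 hlt) hh
      rw [hclnil]
      rfl
  | some j0 =>
      have hhit : hitB lst j0 = true := List.find?_some hF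
      have hmem : j0 ∈ List.range' 0 lst.length := List.mem_of_find?_eq_some hF
      have hj0 : j0 < lst.length := by
        obtain ⟨i, hi, hji⟩ := List.mem_range'.mp hmem
        omega
      have hcand : (lst[j0], (j0 : Int)) ∈ cl := hit_cand lst j0 hj0 hhit
      have hclne : cl ≠ [] := fun h => by rw [h] at hcand; exact absurd hcand (by simp)
      cases hmf : minFold none cl with
      | none =>
          exact absurd ((minFold_eq_none_iff cl none).mp hmf).2 hclne
      | some e =>
          obtain ⟨hme, hmin⟩ := minFold_spec cl none e hmf
          simp only [Option.toList_none, List.nil_append] at hme hmin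
          obtain ⟨jn, hjv, hlt, hxe, hh⟩ := cand_char lst e hme
          have hle1 : j0 ≤ jn :=
            find?_range'_min hF jn (mem_range0 hlt) hh
          have hle2 : e.2 ≤ (j0 : Int) := hmin _ hcand
          have : jn = j0 := by
            rw [hjv] at hle2
            omega
          subst this
          have hget? : lst[jn]? = some lst[jn] := List.getElem?_eq_getElem hj0
          simp [List.getD, hget?, hxe]
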